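-- pv_equiv track=rewrite | github.com/Logenleedev/--Data-Structure-and-Algorithm | Extra/Company_OA/PIMCO/highly_profitable_month.py | count_highly_profitable_months
-- ===== SOURCE A (Python) =====
-- def count_highly_profitable_months(stock_prices, k):
--
--     ans = 0
--
--     for i in range(len(stock_prices) - k + 1):
--         flag = True
--         j = i
--         while j <= i + k - 2:
--
--             if stock_prices[j] > stock_prices[j + 1]:
--                 flag = False
--             j += 1
--
--         if flag:
--             ans += 1
--
--
--
--     return ans
-- ===== SOURCE B (Python) =====
-- def count_highly_profitable_months(stock_prices, k):
--     n = len(stock_prices)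
--     if k <= 1:
--         # every length-k window is trivially non-decreasing; there are n-k+1 of them
--         m = n - k + 1
--         return m if m > 0 else 0
--     ans = 0
--     run = 1  # length of the non-decreasing run ending at the current index
--     for i in range(1, n):
--         if stock_prices[i - 1] <= stock_prices[i]:
--             run += 1
--         else:
--             run = 1
--         if run >= k:
--             ans += 1
--     return ans
-- ===== Notes on version B (the rewrite author's own statement) =====
-- stated objective: faster
-- what changed: Replaced A's per-window rescan of all k-1 adjacent pairs with a single pass that maintains the length of the current non-decreasing run and counts positions where it reaches k (plus the closed form n-k+1 for the trivial k<=1 case).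
import Mathlib
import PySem

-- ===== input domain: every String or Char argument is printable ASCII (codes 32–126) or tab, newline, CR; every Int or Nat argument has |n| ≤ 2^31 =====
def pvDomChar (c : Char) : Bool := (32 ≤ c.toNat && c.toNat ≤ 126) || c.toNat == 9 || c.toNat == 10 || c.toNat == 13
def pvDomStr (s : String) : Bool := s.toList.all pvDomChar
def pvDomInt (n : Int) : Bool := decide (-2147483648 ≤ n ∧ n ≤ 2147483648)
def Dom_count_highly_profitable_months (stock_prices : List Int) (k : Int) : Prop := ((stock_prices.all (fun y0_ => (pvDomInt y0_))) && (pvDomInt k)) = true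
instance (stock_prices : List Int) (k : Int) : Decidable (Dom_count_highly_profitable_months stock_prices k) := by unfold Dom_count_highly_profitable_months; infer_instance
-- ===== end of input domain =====

-- B replaces A's O(n*k) window-by-window rescan with a single O(n) pass over the
-- current non-decreasing run length (plus a closed form for the trivial k <= 1 case).


-- ===== PORT A =====
-- A's inner `while j <= i + k - 2` loop, transcribed as recursion on j.
-- Every access stock_prices[j] / stock_prices[j+1] A performs is in range
-- (0 ≤ i ≤ j, j+1 ≤ i+k-1 ≤ len-1), so pyGetD with default 0 is exact here.
def chpmWhile (sp : List Int) (hi j : Int) (flag : Bool) : Bool :=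
  if h : j ≤ hi then
    chpmWhile sp hi (j + 1)
      (if PySem.List.pyGetD sp j 0 > PySem.List.pyGetD sp (j + 1) 0 then false else flag)
  else flag
termination_by (hi + 1 - j).toNat
decreasing_by omega

def count_highly_profitable_months (stock_prices : List Int) (k : Int) : Int :=
  (PySem.List.pyRange 0 ((stock_prices.length : Int) - k + 1) 1).foldl
    (fun ans i => if chpmWhile stock_prices (i + k - 2) i true then ans + 1 else ans) 0

-- ===== PORT B =====
def count_highly_profitable_months_alt (stock_prices : List Int) (k : Int) : Int :=
  let n : Int := stock_prices.length
  if k ≤ 1 then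
    -- every length-k window is trivially non-decreasing; there are n-k+1 of them
    let m := n - k + 1
    if m > 0 then m else 0
  else
    ((PySem.List.pyRange 1 n 1).foldl
      (fun (st : Int × Int) i =>
        let run : Int :=
          if PySem.List.pyGetD stock_prices (i - 1) 0 ≤ PySem.List.pyGetD stock_prices i 0
          then st.2 + 1 else 1
        (if run ≥ k then st.1 + 1 else st.1, run))
      ((0 : Int), (1 : Int))).1

-- ===== PRECONDITION & SPEC =====
def Spec_count_highly_profitable_months (stock_prices : List Int) (k : Int) (out : Int) : Prop := out = count_highly_profitable_months_alt stock_prices k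
instance (stock_prices : List Int) (k : Int) (out : Int) : Decidable (Spec_count_highly_profitable_months stock_prices k out) := by unfold Spec_count_highly_profitable_months; infer_instance

-- ===== CLAIM (what is proved, stated in full; the proofs are below) =====
def Claim_equal_count_highly_profitable_months : Prop := ∀ (stock_prices : List Int) (k : Int), Dom_count_highly_profitable_months stock_prices k → Spec_count_highly_profitable_months stock_prices k (count_highly_profitable_months stock_prices k)

-- ===== LEMMAS AND PROOFS =====

-- adjacent pair t,t+1 is in order (indices as Nat; default 0 matches the ports' pyGetD)
def pvPairLE (sp : List Int) (t : Nat) : Bool := decide (sp.getD t 0 ≤ sp.getD (t + 1) 0)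

-- pure "all pairs in [j,hi] in order" version of A's inner loop
def pvAllPairs (sp : List Int) (hi j : Int) : Bool :=
  if h : j ≤ hi then
    (decide (PySem.List.pyGetD sp j 0 ≤ PySem.List.pyGetD sp (j + 1) 0)) && pvAllPairs sp hi (j + 1)
  else true
termination_by (hi + 1 - j).toNat
decreasing_by omega

-- length of the non-decreasing run ending at index q
def pvRun (sp : List Int) : Nat → Nat
  | 0 => 1
  | q + 1 => if pvPairLE sp q then pvRun sp q + 1 else 1

lemma chpmWhile_eq (sp : List Int) (hi j : Int) (flag : Bool) :
    chpmWhile sp hi j flag = (flag && pvAllPairs sp hi j) := by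
  rw [chpmWhile, pvAllPairs]
  split
  · rw [chpmWhile_eq sp hi (j + 1)]
    by_cases hg : PySem.List.pyGetD sp j 0 > PySem.List.pyGetD sp (j + 1) 0
    · simp [hg, not_le.mpr hg]
    · simp [hg, not_lt.mp hg]
  · simp
termination_by (hi + 1 - j).toNat
decreasing_by omega

lemma pvAllPairs_iff (sp : List Int) (hi j : Int) (h0 : 0 ≤ j) :
    pvAllPairs sp hi j = true ↔ ∀ t : Nat, j ≤ (t : Int) → (t : Int) ≤ hi → pvPairLE sp t = true := by
  obtain ⟨m, rfl⟩ : ∃ m : Nat, j = (m : Int) := ⟨j.toNat, by omega⟩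
  rw [pvAllPairs]
  split
  · rename_i h
    rw [Bool.and_eq_true, pvAllPairs_iff sp hi ((m : Int) + 1) (by omega)]
    have h1 : ((m : Int)) + 1 = ((m + 1 : Nat) : Int) := by push_cast; ring
    rw [h1, PySem.List.pyGetD_natCast, PySem.List.pyGetD_natCast]
    constructor
    · rintro ⟨hhead, htail⟩ t ht1 ht2
      rcases eq_or_lt_of_le ht1 with heq | hlt
      · have : t = m := by exact_mod_cast heq.symm
        subst this
        simpa [pvPairLE] using hhead
      · exact htail t (by exact_mod_cast hlt) ht2
    · intro hall
      refine ⟨?_, fun t ht1 ht2 => hall t (by omega) ht2⟩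
      simpa [pvPairLE] using hall m le_rfl h
  · rename_i h
    simp only [true_iff]
    intro t ht1 ht2
    omega
termination_by (hi + 1 - j).toNat
decreasing_by omega

lemma pvRun_le_iff (sp : List Int) (q r : Nat) :
    r ≤ pvRun sp q ↔ (r ≤ q + 1 ∧ ∀ t : Nat, t < q → q < t + r → pvPairLE sp t = true) := by
  induction q generalizing r with
  | zero =>
    simp only [pvRun]
    constructor
    · intro h; exact ⟨h, by omega⟩
    · rintro ⟨h, _⟩; omega
  | succ q ih =>
    by_cases hc : pvPairLE sp q = true
    · have hrw : pvRun sp (q + 1) = pvRun sp q + 1 := by simp [pvRun, hc]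
      rw [hrw]
      have h2 : r ≤ pvRun sp q + 1 ↔ r - 1 ≤ pvRun sp q := by omega
      rw [h2, ih (r - 1)]
      constructor
      · rintro ⟨h3, h4⟩
        refine ⟨by omega, fun t ht1 ht2 => ?_⟩
        rcases Nat.lt_or_ge t q with h | h
        · exact h4 t h (by omega)
        · have : t = q := by omega
          subst this; exact hc
      · rintro ⟨h3, h4⟩
        exact ⟨by omega, fun t ht1 ht2 => h4 t (by omega) (by omega)⟩
    · have hrw : pvRun sp (q + 1) = 1 := by simp [pvRun, hc]
      rw [hrw]
      constructor
      · intro h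
        exact ⟨by omega, fun t ht1 ht2 => by omega⟩
      · rintro ⟨h3, h4⟩
        by_contra h
        exact hc (h4 q (by omega) (by omega))

-- A's fold as a count over natural window starts
lemma portA_eq_countP (sp : List Int) (k : Int) :
    count_highly_profitable_months sp k =
      ((List.range (((sp.length : Int) - k + 1).toNat)).countP
        (fun i : Nat => pvAllPairs sp ((i : Int) + k - 2) (i : Int)) : Nat) := by
  unfold count_highly_profitable_months
  rw [PySem.List.pyRange_one, List.foldl_map, PySem.List.foldl_count_if
    (p := fun t : Nat => chpmWhile sp ((0 + (t : Int)) + k - 2) (0 + (t : Int)) true),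
    zero_add, sub_zero]
  congr 1
  apply List.countP_congr
  intro t _
  rw [chpmWhile_eq]
  simp

-- B's loop invariant: state after the first p iterations
lemma portB_invariant (sp : List Int) (k : Int) (p : Nat) :
    ((List.range p).map (fun t : Nat => (1 : Int) + (t : Int))).foldl
      (fun (st : Int × Int) i =>
        let run : Int :=
          if PySem.List.pyGetD sp (i - 1) 0 ≤ PySem.List.pyGetD sp i 0 then st.2 + 1 else 1
        (if run ≥ k then st.1 + 1 else st.1, run))
      ((0 : Int), (1 : Int))
    = ((((List.range p).countP (fun t : Nat => decide (k ≤ ((pvRun sp (t + 1) : Nat) : Int))) : Nat) : Int),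
       ((pvRun sp p : Nat) : Int)) := by
  induction p with
  | zero => simp [pvRun]
  | succ p ih =>
    rw [List.range_succ, List.map_append, List.foldl_append, ih]
    have h1 : ((p + 1 : Nat) : Int) - 1 = ((p : Nat) : Int) := by push_cast; ring
    have h2 : ((1 : Int) + (p : Int)) = ((p + 1 : Nat) : Int) := by push_cast; ring
    simp only [List.map_cons, List.map_nil, List.foldl_cons, List.foldl_nil, h1, h2,
      PySem.List.pyGetD_natCast]
    have hrun : (if sp.getD p 0 ≤ sp.getD (p + 1) 0 then ((pvRun sp p : Nat) : Int) + 1 else 1)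
        = ((pvRun sp (p + 1) : Nat) : Int) := by
      by_cases hc : pvPairLE sp p = true
      · have hle : sp.getD p 0 ≤ sp.getD (p + 1) 0 := by simpa [pvPairLE] using hc
        rw [if_pos hle, show pvRun sp (p + 1) = pvRun sp p + 1 from by simp [pvRun, hc]]
        push_cast; ring
      · have hnle : ¬ sp.getD p 0 ≤ sp.getD (p + 1) 0 := by simpa [pvPairLE] using hc
        rw [if_neg hnle, show pvRun sp (p + 1) = 1 from by simp [pvRun, hc]]
        norm_num
    rw [hrun, List.countP_append, List.countP_cons, List.countP_nil]
    refine Prod.ext ?_ rfl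
    simp only [ge_iff_le]
    by_cases hk : k ≤ ((pvRun sp (p + 1) : Nat) : Int)
    · rw [if_pos hk]
      simp only [hk, decide_true]
      push_cast; ring
    · rw [if_neg hk]
      simp only [hk, decide_false]
      push_cast; ring

-- count shift: drop the first d indices and reindex
lemma countP_range_shift (N d : Nat) (p : Nat → Bool) :
    (List.range N).countP (fun t => decide (d ≤ t) && p (t - d))
      = (List.range (N - d)).countP p := by
  by_cases h : d ≤ N
  · obtain ⟨M, rfl⟩ : ∃ M, N = d + M := ⟨N - d, by omega⟩
    rw [List.range_add, List.countP_append, List.countP_map]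
    have hz : (List.range d).countP (fun t => decide (d ≤ t) && p (t - d)) = 0 := by
      refine List.countP_eq_zero.mpr (fun t ht => ?_)
      have ht' : t < d := List.mem_range.mp ht
      simp [Nat.not_le.mpr ht']
    have hc : ((fun t => decide (d ≤ t) && p (t - d)) ∘ (fun x => d + x)) = p := by
      funext x
      simp
    rw [hz, hc, Nat.add_sub_cancel_left, Nat.zero_add]
  · rw [(by omega : N - d = 0), List.countP_eq_zero.mpr]
    · simp
    · intro t ht
      have ht' : t < N := List.mem_range.mp ht
      simp [Nat.not_le.mpr (show t < d by omega)]

-- pointwise translation between B's run condition and A's window condition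
lemma run_cond_eq_window (sp : List Int) (k' : Nat) (hk : 2 ≤ k') (t : Nat) :
    (decide ((k' : Int) ≤ ((pvRun sp (t + 1) : Nat) : Int)))
      = (decide (k' - 2 ≤ t) && pvAllPairs sp (((t - (k' - 2) : Nat) : Int) + (k' : Int) - 2)
          ((t - (k' - 2) : Nat) : Int)) := by
  have hiff : ((k' : Int) ≤ ((pvRun sp (t + 1) : Nat) : Int)) ↔ (k' ≤ pvRun sp (t + 1)) := by
    exact_mod_cast Iff.rfl
  by_cases hd : k' - 2 ≤ t
  · set i : Nat := t - (k' - 2) with hi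
    have happ := pvAllPairs_iff sp (((i : Nat) : Int) + (k' : Int) - 2) ((i : Nat) : Int) (by positivity)
    rw [Bool.eq_iff_iff]
    simp only [decide_eq_true_eq, Bool.and_eq_true, happ, hiff, pvRun_le_iff]
    constructor
    · rintro ⟨h1, h2⟩
      refine ⟨by omega, fun s hs1 hs2 => h2 s (by omega) (by omega)⟩
    · rintro ⟨_, h2⟩
      refine ⟨by omega, fun s hs1 hs2 => h2 s (by omega) (by omega)⟩
  · have h1 : ¬ (k' ≤ pvRun sp (t + 1)) := by
      rw [pvRun_le_iff]
      rintro ⟨h2, _⟩; omega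
    rw [Bool.eq_iff_iff]
    simp only [decide_eq_true_eq, Bool.and_eq_true, hiff]
    constructor
    · intro h; exact absurd h h1
    · rintro ⟨h2, _⟩; omega

-- ===== VERDICT (by name: the statement is the Claim_ definition above) =====
theorem count_highly_profitable_months_spec : Claim_equal_count_highly_profitable_months := by
  intro sp k _
  unfold Spec_count_highly_profitable_months
  simp only [count_highly_profitable_months_alt]
  by_cases hk : k ≤ 1
  · -- trivial windows: A counts every start, B uses the closed form
    rw [portA_eq_countP]
    have hall : ∀ i : Nat, pvAllPairs sp ((i : Int) + k - 2) (i : Int) = true := by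
      intro i
      rw [pvAllPairs]
      split
      · omega
      · rfl
    rw [List.countP_eq_length.mpr (fun a _ => hall a), List.length_range]
    simp only [if_pos hk]
    split_ifs with h <;> omega
  · -- k ≥ 2: both sides count the same windows
    simp only [hk, if_false]
    obtain ⟨k', rfl⟩ : ∃ k' : Nat, k = (k' : Int) := ⟨k.toNat, by omega⟩
    have hk2 : 2 ≤ k' := by omega
    rw [portA_eq_countP, PySem.List.pyRange_one, portB_invariant]
    have hlen : (((sp.length : Int)) - 1).toNat = sp.length - 1 := by omega
    rw [hlen]
    have hcong : (List.range (sp.length - 1)).countP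
          (fun t : Nat => decide ((k' : Int) ≤ ((pvRun sp (t + 1) : Nat) : Int)))
        = (List.range (sp.length - 1)).countP
          (fun t : Nat => decide (k' - 2 ≤ t) && pvAllPairs sp
            (((t - (k' - 2) : Nat) : Int) + (k' : Int) - 2) ((t - (k' - 2) : Nat) : Int)) := by
      apply List.countP_congr
      intro t _
      rw [run_cond_eq_window sp k' hk2 t]
    rw [hcong, countP_range_shift (sp.length - 1) (k' - 2)
      (fun i : Nat => pvAllPairs sp ((i : Int) + (k' : Int) - 2) (i : Int))]
    have hN : sp.length - 1 - (k' - 2) = (((sp.length : Int)) - (k' : Int) + 1).toNat := by omega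
    rw [hN]
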